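-- pv_equiv track=rewrite | github.com/atharrison/python-adventofcode2020 | day20/day20.py | diagonal_iteration
-- ===== SOURCE A (Python) =====
-- def diagonal_iteration(size):
--     """
--     Iterate over a two-dimensional matrix diagonally
--     Starting with [0, 0] and ending at [size-1, size-1]
--     """
--     for a in range(0, size, 1):
--         for b in range(a + 1, 0, -1):
--             x = a - b + 1
--             y = b - 1
--             yield x, y
--
--     for a in range(0, size, 1):
--         for b in range(size - a - 1, 0, -1):
--             x = size - b
--             y = b + a
--             yield x, y
-- ===== SOURCE B (Python) =====
-- def diagonal_iteration(size):
--     """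
--     Iterate over a two-dimensional matrix diagonally
--     Starting with [0, 0] and ending at [size-1, size-1]
--     """
--     for d in range(2 * size - 1):
--         for x in range(max(0, d - size + 1), min(d, size - 1) + 1):
--             yield x, d - x
-- ===== Notes on version B (the rewrite author's own statement) =====
-- stated objective: simpler
-- what changed: A single loop over the diagonal index d with clamped x-bounds replaces A's two separate triangle-scanning loop nests and their backwards-counting b variable.
import Mathlib
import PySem

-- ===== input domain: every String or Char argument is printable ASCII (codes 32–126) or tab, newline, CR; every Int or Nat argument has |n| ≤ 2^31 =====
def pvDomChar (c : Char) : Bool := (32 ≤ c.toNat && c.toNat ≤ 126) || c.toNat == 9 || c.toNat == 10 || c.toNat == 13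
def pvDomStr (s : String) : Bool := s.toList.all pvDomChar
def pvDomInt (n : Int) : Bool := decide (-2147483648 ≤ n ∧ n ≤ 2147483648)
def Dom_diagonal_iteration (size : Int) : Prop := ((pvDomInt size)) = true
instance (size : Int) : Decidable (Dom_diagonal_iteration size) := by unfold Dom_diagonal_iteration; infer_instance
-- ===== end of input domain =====

-- B replaces A's two triangle-scanning loop nests by one loop over the diagonal index
-- with clamped bounds (objective: simpler).

-- ===== PORT A =====
-- the generator's yields collected in order: first loop nest, then second loop nest
def diagonal_iteration (size : Int) : List (Int × Int) :=
  let acc1 := (PySem.List.pyRange 0 size 1).foldl (fun acc a =>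
      (PySem.List.pyRange (a + 1) 0 (-1)).foldl (fun acc b =>
        acc ++ [(a - b + 1, b - 1)]) acc) []
  (PySem.List.pyRange 0 size 1).foldl (fun acc a =>
      (PySem.List.pyRange (size - a - 1) 0 (-1)).foldl (fun acc b =>
        acc ++ [(size - b, b + a)]) acc) acc1

-- ===== PORT B =====
def diagonal_iteration_alt (size : Int) : List (Int × Int) :=
  (PySem.List.pyRange 0 (2 * size - 1) 1).foldl (fun acc d =>
      (PySem.List.pyRange (max 0 (d - size + 1)) (min d (size - 1) + 1) 1).foldl (fun acc x =>
        acc ++ [(x, d - x)]) acc) []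

-- ===== PRECONDITION & SPEC =====
def Spec_diagonal_iteration (size : Int) (out : List (Int × Int)) : Prop := out = diagonal_iteration_alt size
instance (size : Int) (out : List (Int × Int)) : Decidable (Spec_diagonal_iteration size out) := by unfold Spec_diagonal_iteration; infer_instance

-- ===== CLAIM (what is proved, stated in full; the proofs are below) =====
def Claim_equal_diagonal_iteration : Prop := ∀ (size : Int), Dom_diagonal_iteration size → Spec_diagonal_iteration size (diagonal_iteration size)

-- ===== LEMMAS AND PROOFS =====

theorem pv_flatten_map_singleton {α β : Type} (l : List α) (g : α → β) :
    (l.map (fun x => [g x])).flatten = l.map g := by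
  induction l with
  | nil => simp
  | cons x xs ih => simp [ih]

theorem pv_flatMap_congr {α β : Type} (l : List α) (f g : α → List β)
    (h : ∀ x ∈ l, f x = g x) : l.flatMap f = l.flatMap g := by
  simp only [List.flatMap]
  exact congrArg List.flatten (List.map_congr_left h)

-- A as two flatMaps
theorem pv_A_eq (size : Int) :
    diagonal_iteration size =
      (PySem.List.pyRange 0 size 1).flatMap (fun a =>
        (PySem.List.pyRange (a + 1) 0 (-1)).map (fun b => (a - b + 1, b - 1)))
      ++ (PySem.List.pyRange 0 size 1).flatMap (fun a =>
        (PySem.List.pyRange (size - a - 1) 0 (-1)).map (fun b => (size - b, b + a))) := by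
  simp [diagonal_iteration, List.flatMap, pv_flatten_map_singleton]

-- B as one flatMap
theorem pv_B_eq (size : Int) :
    diagonal_iteration_alt size =
      (PySem.List.pyRange 0 (2 * size - 1) 1).flatMap (fun d =>
        (PySem.List.pyRange (max 0 (d - size + 1)) (min d (size - 1) + 1) 1).map
          (fun x => (x, d - x))) := by
  simp [diagonal_iteration_alt, List.flatMap, pv_flatten_map_singleton]

-- on a lower diagonal (0 ≤ d < size) B's inner list equals A's first inner list
theorem pv_lower (size d : Int) (_h0 : 0 ≤ d) (h1 : d < size) :
    (PySem.List.pyRange (max 0 (d - size + 1)) (min d (size - 1) + 1) 1).map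
      (fun x => (x, d - x)) =
    (PySem.List.pyRange (d + 1) 0 (-1)).map (fun b => (d - b + 1, b - 1)) := by
  have hmax : max 0 (d - size + 1) = 0 := by omega
  have hmin : min d (size - 1) = d := by omega
  rw [hmax, hmin, PySem.List.pyRange_one, PySem.List.pyRange_neg_one, List.map_map,
    List.map_map]
  apply List.map_congr_left
  intro k _
  simp only [Function.comp, Prod.mk.injEq]
  constructor <;> omega

-- on an upper diagonal d = size + a (0 ≤ a) B's inner list equals A's second inner list
theorem pv_upper (size a : Int) (h0 : 0 ≤ a) :
    (PySem.List.pyRange (max 0 (size + a - size + 1)) (min (size + a) (size - 1) + 1) 1).map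
      (fun x => (x, size + a - x)) =
    (PySem.List.pyRange (size - a - 1) 0 (-1)).map (fun b => (size - b, b + a)) := by
  have hmax : max 0 (size + a - size + 1) = a + 1 := by omega
  have hmin : min (size + a) (size - 1) = size - 1 := by omega
  rw [hmax, hmin]
  have hlen : (size - 1 + 1 - (a + 1)).toNat = (size - a - 1 - 0).toNat := by omega
  rw [PySem.List.pyRange_one, PySem.List.pyRange_neg_one, List.map_map, List.map_map, hlen]
  apply List.map_congr_left
  intro k _
  simp only [Function.comp, Prod.mk.injEq]
  constructor <;> omega

-- ===== VERDICT (by name: the statement is the Claim_ definition above) =====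
theorem diagonal_iteration_spec : Claim_equal_diagonal_iteration := by
  intro size _
  unfold Spec_diagonal_iteration
  rw [pv_A_eq, pv_B_eq]
  by_cases hpos : size ≤ 0
  · rw [PySem.List.pyRange_one_eq_nil hpos, PySem.List.pyRange_one_eq_nil (by omega : 2 * size - 1 ≤ 0)]
    simp
  · push Not at hpos
    -- split B's diagonal range at size
    rw [PySem.List.pyRange_one_append 0 size (2 * size - 1) (by omega) (by omega),
      List.flatMap_append]
    congr 1
    · -- lower diagonals
      apply pv_flatMap_congr
      intro d hd
      rw [PySem.List.mem_pyRange_one] at hd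
      exact (pv_lower size d hd.1 hd.2).symm
    · -- upper diagonals: A's last outer iteration (a = size-1) yields nothing
      rw [PySem.List.pyRange_one_append 0 (size - 1) size (by omega) (by omega),
        List.flatMap_append]
      have hsing : PySem.List.pyRange (size - 1) size 1 = [size - 1] := by
        rw [PySem.List.pyRange_one, show (size - (size - 1)).toNat = 1 by omega]
        simp
      have hnil : PySem.List.pyRange (size - (size - 1) - 1) 0 (-1) = [] :=
        PySem.List.pyRange_neg_one_eq_nil (by omega)
      rw [hsing, List.flatMap_singleton, hnil, List.map_nil, List.append_nil]
      -- reindex B's upper range by d = size + a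
      have hre : PySem.List.pyRange size (2 * size - 1) 1 =
          (PySem.List.pyRange 0 (size - 1) 1).map (fun a => size + a) := by
        rw [PySem.List.pyRange_one, PySem.List.pyRange_one, List.map_map]
        have : (2 * size - 1 - size).toNat = (size - 1 - 0).toNat := by omega
        rw [this]
        apply List.map_congr_left
        intro k _
        simp only [Function.comp]
        omega
      rw [hre, List.flatMap_map]
      apply pv_flatMap_congr
      intro a ha
      rw [PySem.List.mem_pyRange_one] at ha
      exact (pv_upper size a ha.1).symm
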